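-- pv_equiv track=rewrite | github.com/orangeshop/boj | 프로그래머스/1/161989. 덧칠하기/덧칠하기.py | solution
-- ===== SOURCE A (Python) =====
-- def solution(n, m, section):
--     answer = 0
--     target = 0
--     for i in range(len(section)):
--         if(target < section[i]):
--             target = (section[i]-1) + m
--             answer += 1
--
--     return answer
-- ===== SOURCE B (Python) =====
-- def solution(n, m, section):
--     # eliminate-and-paint: repeatedly drop every section already covered,
--     # paint at the first survivor, and drop it too
--     answer = 0
--     end = 0
--     rest = section
--     while True:
--         rest = [x for x in rest if x > end]
--         if not rest:
--             return answer
--         answer += 1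
--         end = rest[0] - 1 + m
--         rest = rest[1:]
-- ===== Notes on version B (the rewrite author's own statement) =====
-- stated objective: alternative
-- what changed: B replaces A's single pass with a running target by an eliminate-and-paint loop: each round it rebuilds the worklist by filtering out every section already covered by the current stroke, paints at the first survivor, and drops it; no per-element target comparison pass remains.
-- outside the precondition, e.g. on solution(10, -1, [5, 4, 3]): A returns 3, B returns 2
import Mathlib
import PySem

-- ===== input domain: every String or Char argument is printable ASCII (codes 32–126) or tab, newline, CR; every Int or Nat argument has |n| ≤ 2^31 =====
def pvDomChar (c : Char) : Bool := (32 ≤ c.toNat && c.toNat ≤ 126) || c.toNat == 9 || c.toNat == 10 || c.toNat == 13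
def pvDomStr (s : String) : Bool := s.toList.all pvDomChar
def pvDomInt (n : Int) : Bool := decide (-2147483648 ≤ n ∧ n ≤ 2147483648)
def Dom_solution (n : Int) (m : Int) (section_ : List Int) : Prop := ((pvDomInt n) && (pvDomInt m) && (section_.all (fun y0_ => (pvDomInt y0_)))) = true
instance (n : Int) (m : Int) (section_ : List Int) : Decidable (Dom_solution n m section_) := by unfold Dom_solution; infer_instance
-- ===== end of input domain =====

-- B paints by repeatedly filtering out all covered sections and painting at the first survivor,
-- instead of A's single pass with a running target; same results for non-negative roller length m.


-- ===== PORT A =====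
-- for-loop over the sections carrying (answer, target)
def solution (n : Int) (m : Int) (section_ : List Int) : Int :=
  (section_.foldl
    (fun (st : Int × Int) x => if st.2 < x then (st.1 + 1, (x - 1) + m) else st)
    ((0 : Int), (0 : Int))).1

-- ===== PORT B =====
-- each round: filter out everything covered by `e`, paint at the first survivor, drop it
def bLoop (m : Int) (rest : List Int) (e : Int) (acc : Int) : Int :=
  match h : rest.filter (fun y => decide (e < y)) with
  | [] => acc
  | x :: xs => bLoop m xs (x - 1 + m) (acc + 1)
termination_by rest.length
decreasing_by
  have hle := List.length_filter_le (fun y => decide (e < y)) rest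
  rw [h] at hle
  simp only [List.length_cons] at hle
  omega

def solution_alt (n : Int) (m : Int) (section_ : List Int) : Int :=
  bLoop m section_ 0 0

-- ===== PRECONDITION & SPEC =====
-- Pre_ requires a non-negative roller length m: negative m is outside the task's natural
-- domain (a roller always has positive length) and neither program's value is specified there.
def Pre_solution (n : Int) (m : Int) (section_ : List Int) : Prop := 0 ≤ m
instance (n : Int) (m : Int) (section_ : List Int) : Decidable (Pre_solution n m section_) := by unfold Pre_solution; infer_instance
def pvWitness_solution : Int × Int × List Int := (8, 4, [2, 4, 6])
def Spec_solution (n : Int) (m : Int) (section_ : List Int) (out : Int) : Prop := out = solution_alt n m section_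
instance (n : Int) (m : Int) (section_ : List Int) (out : Int) : Decidable (Spec_solution n m section_ out) := by unfold Spec_solution; infer_instance

-- ===== CLAIM (what is proved, stated in full; the proofs are below) =====
def Claim_equal_solution : Prop := ∀ (n : Int) (m : Int) (section_ : List Int), Dom_solution n m section_ → Pre_solution n m section_ → Spec_solution n m section_ (solution n m section_)

-- ===== LEMMAS AND PROOFS =====
-- With m ≥ 0 the running target never drops below a bound e it once exceeded, so the fold
-- over a list equals the fold over the list with everything ≤ e filtered away.
lemma foldl_filter_gt (m : Int) (hm : 0 ≤ m) (e : Int) (xs : List Int) :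
    ∀ e' : Int, e ≤ e' → ∀ acc : Int,
    xs.foldl (fun (st : Int × Int) x => if st.2 < x then (st.1 + 1, (x - 1) + m) else st) (acc, e')
    = (xs.filter (fun y => decide (e < y))).foldl
        (fun (st : Int × Int) x => if st.2 < x then (st.1 + 1, (x - 1) + m) else st) (acc, e') := by
  induction xs with
  | nil => intro e' _ acc; rfl
  | cons x rest ih =>
    intro e' he acc
    by_cases hx : e < x
    · rw [List.filter_cons_of_pos (by simp [hx])]
      simp only [List.foldl_cons]
      by_cases hx' : e' < x
      · simp only [if_pos hx']
        exact ih (x - 1 + m) (by omega) (acc + 1)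
      · simp only [if_neg hx']
        exact ih e' he acc
    · rw [List.filter_cons_of_neg (by simp [hx])]
      simp only [List.foldl_cons, if_neg (show ¬ e' < x by omega)]
      exact ih e' he acc

lemma bLoop_eq_foldl (m : Int) (hm : 0 ≤ m) : ∀ (fuel : Nat) (xs : List Int), xs.length ≤ fuel →
    ∀ (e acc : Int),
    bLoop m xs e acc
    = (xs.foldl (fun (st : Int × Int) x => if st.2 < x then (st.1 + 1, (x - 1) + m) else st)
        (acc, e)).1 := by
  intro fuel
  induction fuel with
  | zero =>
    intro xs hxs e acc
    have : xs = [] := List.eq_nil_of_length_eq_zero (Nat.le_zero.mp hxs)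
    subst this
    simp [bLoop]
  | succ k ih =>
    intro xs hxs e acc
    rw [bLoop, foldl_filter_gt m hm e xs e le_rfl acc]
    cases h : xs.filter (fun y => decide (e < y)) with
    | nil => simp
    | cons x tail =>
      have hx : e < x := by
        have := List.of_mem_filter (p := fun y => decide (e < y)) (a := x)
          (l := xs) (by rw [h]; exact List.mem_cons_self)
        simpa using this
      have hlen : (xs.filter (fun y => decide (e < y))).length ≤ xs.length :=
        List.length_filter_le _ _
      rw [h] at hlen
      simp only [List.length_cons] at hlen
      simp only [List.foldl_cons, hx, if_true]
      exact ih tail (by omega) (x - 1 + m) (acc + 1)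

-- ===== VERDICT (by name: the statement is the Claim_ definition above) =====
theorem solution_spec : Claim_equal_solution := by
  intro n m section_ _ hm
  unfold Spec_solution solution solution_alt
  exact (bLoop_eq_foldl m hm section_.length section_ le_rfl 0 0).symm
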